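-- pv_equiv track=rewrite | github.com/ViThiThuLe/code-python-ptit | python/mat_ma_don_gian.py | ktra
-- ===== SOURCE A (Python) =====
-- def ktra(x):
--     tmp = ""
--     dem = 0
--     for i in range(len(x)):
--         if x[i] >= '0' and x[i] <= '9':
--             if dem == 1:
--                 dem = 2
--             continue
--         if dem == 0:
--             dem = 1
--         if dem == 1:
--             tmp += x[i]
--         if dem > 1:
--             break
--     return tmp
-- ===== SOURCE B (Python) =====
-- import re
--
-- def ktra(x):
--     m = re.search(r'[^0-9]+', x)
--     return m.group() if m else ""
-- ===== Notes on version B (the rewrite author's own statement) =====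
-- stated objective: idiomatic
-- what changed: Replaced A's three-state character-by-character Python loop with a single C-level regex search for the first maximal non-digit run, removing per-character interpreter overhead.
import Mathlib
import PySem

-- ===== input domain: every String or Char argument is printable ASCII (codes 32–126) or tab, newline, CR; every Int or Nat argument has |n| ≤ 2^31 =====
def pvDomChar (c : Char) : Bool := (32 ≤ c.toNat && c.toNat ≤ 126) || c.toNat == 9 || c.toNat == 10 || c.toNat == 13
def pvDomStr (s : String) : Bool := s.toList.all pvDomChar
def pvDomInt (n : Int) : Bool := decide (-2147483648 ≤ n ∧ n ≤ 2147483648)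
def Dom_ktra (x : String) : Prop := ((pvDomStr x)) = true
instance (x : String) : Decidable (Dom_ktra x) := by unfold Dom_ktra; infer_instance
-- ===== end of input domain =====

-- B replaces A's three-state per-character loop with a regex search for the
-- first maximal non-digit run (equal return value; same O(n) cost).

-- ===== PORT A =====
-- A's loop over the characters of x with state (dem, tmp); break returns tmp.
def ktraLoop : List Char → Nat → List Char → List Char
  | [], _, tmp => tmp
  | c :: cs, dem, tmp =>
    if ('0' ≤ c && c ≤ '9') then
      ktraLoop cs (if dem = 1 then 2 else dem) tmp
    else
      let dem' := if dem = 0 then 1 else dem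
      let tmp' := if dem' = 1 then tmp ++ [c] else tmp
      if dem' > 1 then tmp' else ktraLoop cs dem' tmp'

def ktra (x : String) : String := String.ofList (ktraLoop x.toList 0 [])

-- ===== PORT B =====
-- re.search(r'[^0-9]+', x): the first maximal run of non-digit characters
-- ('' when there is none) = skip the leading digits, take the non-digit run.
def pvNonDigit (c : Char) : Bool := !('0' ≤ c && c ≤ '9')

def ktra_alt (x : String) : String :=
  String.ofList ((x.toList.dropWhile (fun c => !pvNonDigit c)).takeWhile pvNonDigit)

-- ===== PRECONDITION & SPEC =====
def Spec_ktra (x : String) (out : String) : Prop := out = ktra_alt x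
instance (x : String) (out : String) : Decidable (Spec_ktra x out) := by unfold Spec_ktra; infer_instance

-- ===== CLAIM (what is proved, stated in full; the proofs are below) =====
def Claim_equal_ktra : Prop := ∀ (x : String), Dom_ktra x → Spec_ktra x (ktra x)

-- ===== LEMMAS AND PROOFS =====

-- in state 2 the loop returns the accumulator unchanged (digits continue, a non-digit breaks)
theorem ktraLoop_two (cs : List Char) (tmp : List Char) : ktraLoop cs 2 tmp = tmp := by
  induction cs generalizing tmp with
  | nil => rfl
  | cons c cs ih =>
    simp only [ktraLoop]
    split
    · simpa using ih tmp
    · simp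

-- in state 1 the loop appends exactly the leading non-digit run
theorem ktraLoop_one (cs : List Char) (tmp : List Char) :
    ktraLoop cs 1 tmp = tmp ++ cs.takeWhile pvNonDigit := by
  induction cs generalizing tmp with
  | nil => simp [ktraLoop]
  | cons c cs ih =>
    simp only [ktraLoop]
    by_cases h : ('0' ≤ c && c ≤ '9') = true
    · simp [h, ktraLoop_two, List.takeWhile, pvNonDigit]
    · simp only [h, Bool.false_eq_true, if_false]
      simp [ih, pvNonDigit, h]

-- in state 0 the loop skips leading digits then collects the non-digit run
theorem ktraLoop_zero (cs : List Char) :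
    ktraLoop cs 0 [] = (cs.dropWhile (fun c => !pvNonDigit c)).takeWhile pvNonDigit := by
  induction cs with
  | nil => rfl
  | cons c cs ih =>
    simp only [ktraLoop]
    by_cases h : ('0' ≤ c && c ≤ '9') = true
    · simp [h, ih, List.dropWhile, pvNonDigit]
    · simp only [h, Bool.false_eq_true, if_false]
      simp [ktraLoop_one, List.dropWhile, pvNonDigit, h]

-- ===== VERDICT (by name: the statement is the Claim_ definition above) =====
theorem ktra_spec : Claim_equal_ktra := by
  intro x _
  unfold Spec_ktra ktra ktra_alt
  rw [ktraLoop_zero]
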